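-- pv_equiv track=rewrite | github.com/james-lubwama/CS50 | Python/pset6/dna/dna.py | check_repeats
-- ===== SOURCE A (Python) =====
-- def check_repeats(the_str, sequence_length, sequence):
--
--     # Calculate number of characters in the STR, ie 4 in AATG
--     str_chars = len(the_str)
--
--     # Empty list into which the locations of the STRs in the sequence will be recorded
--     str_starts = []
--
--     # Loop through the sequence, recording the location of the first STR character (i.e. A in AATG)
--     # and storing that location in the str_starts list
--     for i in range(sequence_length - str_chars):
--         if the_str in sequence[i:i + str_chars]:
--             str_starts.append(i)
--
--     # If there was only one instance of the STR in the sequence, simply return 1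
--     if len(str_starts) == 1:
--         return 1
--
--     # Set counter variables
--     current_count = 1
--     highest_count = 0
--
--     # Loop through the str_starts list, looking for repeating STRs. When found, begin counting, and update
--     # the highest_count variable. When a new repeating sequence is found, overwrite the previous highest_count
--     # value if it is higher. Always reset current_count when repetition is stopped/not found.
--     for j in range(len(str_starts) - 1):
--         if str_starts[j] + str_chars == str_starts[j + 1]:
--             current_count += 1
--             if current_count > highest_count:
--                 highest_count = current_count
--         elif current_count > highest_count:
--             highest_count = current_count
--             current_count = 1
--         else:
--             current_count = 1
--
--     # If there was more than one instance of the STR in the sequence, look if the repetition occurred at the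
--     # end of the sequence. If so add one to the value returned by the function.
--     if len(str_starts) > 1:
--         if str_starts[-1] == sequence[-str_chars]:
--             highest_count += 1
--
--     return highest_count
-- ===== SOURCE B (Python) =====
-- def check_repeats(the_str, sequence_length, sequence):
--     # One fused pass: no positions list; track the previous match index and the
--     # current/best chain of matches spaced exactly len(the_str) apart.
--     k = len(the_str)
--     best = 0
--     cur = 0
--     prev = None
--     for i in range(sequence_length - k):
--         if the_str in sequence[i:i + k]:
--             cur = cur + 1 if prev is not None and prev + k == i else 1
--             if cur > best:
--                 best = cur
--             prev = i
--     return best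
-- ===== Notes on version B (the rewrite author's own statement) =====
-- stated objective: alternative
-- what changed: B fuses A's two passes (build a list of all match positions, then re-scan it by index for chains) into one streaming scan that keeps only (best, current chain length, previous match index), building no intermediate list; A's dead final int==str comparison disappears.
-- crash fix: When the_str == '' and sequence == '' with sequence_length >= 2, A raises IndexError at sequence[-str_chars]; B returns 1. — e.g. on check_repeats("", 2, ""): A raises IndexError, B returns 1
import Mathlib
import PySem

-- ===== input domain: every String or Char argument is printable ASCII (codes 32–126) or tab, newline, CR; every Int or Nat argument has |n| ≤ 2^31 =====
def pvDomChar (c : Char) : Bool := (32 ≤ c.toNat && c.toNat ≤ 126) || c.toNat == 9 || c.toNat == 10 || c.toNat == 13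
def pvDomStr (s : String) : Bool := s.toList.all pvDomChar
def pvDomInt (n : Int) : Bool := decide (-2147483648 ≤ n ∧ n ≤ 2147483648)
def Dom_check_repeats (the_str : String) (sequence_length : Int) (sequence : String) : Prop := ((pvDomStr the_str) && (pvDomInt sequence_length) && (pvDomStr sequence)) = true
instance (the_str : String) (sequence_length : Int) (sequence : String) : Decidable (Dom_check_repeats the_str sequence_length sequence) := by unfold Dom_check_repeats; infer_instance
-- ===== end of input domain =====

-- B fuses A's two passes into one streaming scan (no positions list); equivalence is
-- about the return value on inputs where A returns (Pre_ excludes exactly A's IndexError inputs).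

-- ===== PORT A =====
def check_repeats (the_str : String) (sequence_length : Int) (sequence : String) : Int :=
  let str_chars : Int := PySem.Str.len the_str
  let str_starts : List Int :=
    (PySem.List.pyRange 0 (sequence_length - str_chars) 1).foldl
      (fun acc i =>
        if PySem.Str.isIn the_str (PySem.Str.slice sequence (some i) (some (i + str_chars)))
        then acc ++ [i] else acc) []
  if PySem.List.len str_starts = 1 then 1
  else
    -- second loop, state = (current_count, highest_count)
    let counts : Int × Int :=
      (PySem.List.pyRange 0 (PySem.List.len str_starts - 1) 1).foldl
        (fun s j =>
          if PySem.List.pyGetD str_starts j 0 + str_chars = PySem.List.pyGetD str_starts (j + 1) 0 then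
            (s.1 + 1, if s.1 + 1 > s.2 then s.1 + 1 else s.2)
          else if s.1 > s.2 then (1, s.1)
          else (1, s.2)) (1, 0)
    if PySem.List.len str_starts > 1 then
      match PySem.Str.pyGet? sequence (-str_chars) with
      | none => 0  -- Python raises IndexError at sequence[-str_chars] here; excluded by Pre_
      | some _ => counts.2  -- `str_starts[-1] == sequence[-str_chars]` compares int with str: always False in Python
    else counts.2

-- ===== PORT B =====
def check_repeats_alt (the_str : String) (sequence_length : Int) (sequence : String) : Int :=
  let k : Int := PySem.Str.len the_str
  (((PySem.List.pyRange 0 (sequence_length - k) 1).foldl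
      (fun (state : Int × Int × Option Int) i =>
        if PySem.Str.isIn the_str (PySem.Str.slice sequence (some i) (some (i + k))) then
          let cur : Int := match state.2.2 with
            | some p => if p + k = i then state.2.1 + 1 else 1
            | none => 1
          (if cur > state.1 then cur else state.1, cur, some i)
        else state) ((0 : Int), (0 : Int), (none : Option Int))).1)

-- ===== PRECONDITION & SPEC =====
-- Pre_ excludes exactly the inputs on which A raises IndexError (the_str = "" and sequence = ""
-- with sequence_length ≥ 2: A then evaluates sequence[-0] on the empty string).
def Pre_check_repeats (the_str : String) (sequence_length : Int) (sequence : String) : Prop :=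
  ¬ (the_str = "" ∧ sequence = "" ∧ 2 ≤ sequence_length)
instance (the_str : String) (sequence_length : Int) (sequence : String) : Decidable (Pre_check_repeats the_str sequence_length sequence) := by unfold Pre_check_repeats; infer_instance

def pvWitness_check_repeats : String × Int × String := ("AT", 8, "ATATGCAT")

-- On the_str = "" and sequence = "" with sequence_length ≥ 2, A raises IndexError at
-- sequence[-str_chars]; B returns 1 (every position of the empty STR matches, no two chained).
def Raises_check_repeats (the_str : String) (sequence_length : Int) (sequence : String) : Prop :=
  the_str = "" ∧ sequence = "" ∧ 2 ≤ sequence_length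
instance (the_str : String) (sequence_length : Int) (sequence : String) : Decidable (Raises_check_repeats the_str sequence_length sequence) := by unfold Raises_check_repeats; infer_instance
def pvRaiseWitness_check_repeats : String × Int × String := ("", 2, "")
def pvRaiseWitnessOut_check_repeats : Int := 1

def Spec_check_repeats (the_str : String) (sequence_length : Int) (sequence : String) (out : Int) : Prop := out = check_repeats_alt the_str sequence_length sequence
instance (the_str : String) (sequence_length : Int) (sequence : String) (out : Int) : Decidable (Spec_check_repeats the_str sequence_length sequence out) := by unfold Spec_check_repeats; infer_instance

-- ===== CLAIM (what is proved, stated in full; the proofs are below) =====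
def Claim_equal_check_repeats : Prop := ∀ (the_str : String) (sequence_length : Int) (sequence : String), Dom_check_repeats the_str sequence_length sequence → Pre_check_repeats the_str sequence_length sequence → Spec_check_repeats the_str sequence_length sequence (check_repeats the_str sequence_length sequence)

def Claim_raises_check_repeats : Prop := (∀ (the_str : String) (sequence_length : Int) (sequence : String), Dom_check_repeats the_str sequence_length sequence → Raises_check_repeats the_str sequence_length sequence → ¬ Pre_check_repeats the_str sequence_length sequence) ∧ (Dom_check_repeats (pvRaiseWitness_check_repeats.1) (pvRaiseWitness_check_repeats.2.1) (pvRaiseWitness_check_repeats.2.2) ∧ Raises_check_repeats (pvRaiseWitness_check_repeats.1) (pvRaiseWitness_check_repeats.2.1) (pvRaiseWitness_check_repeats.2.2) ∧ check_repeats_alt (pvRaiseWitness_check_repeats.1) (pvRaiseWitness_check_repeats.2.1) (pvRaiseWitness_check_repeats.2.2) = pvRaiseWitnessOut_check_repeats)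

-- ===== LEMMAS AND PROOFS =====

-- A's second-loop body as a function of the adjacent pair (str_starts[j], str_starts[j+1]).
def astep (k : Int) : Int × Int → Int × Int → Int × Int := fun s p =>
  if p.1 + k = p.2 then (s.1 + 1, if s.1 + 1 > s.2 then s.1 + 1 else s.2)
  else if s.1 > s.2 then (1, s.1)
  else (1, s.2)

-- B's loop body restricted to matching positions.
def gstep (k : Int) : (Int × Int × Option Int) → Int → (Int × Int × Option Int) := fun state i =>
  let cur : Int := match state.2.2 with
    | some p => if p + k = i then state.2.1 + 1 else 1
    | none => 1
  (if cur > state.1 then cur else state.1, cur, some i)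

theorem altB_eq (the_str : String) (sequence_length : Int) (sequence : String) :
    check_repeats_alt the_str sequence_length sequence =
    (((PySem.List.pyRange 0 (sequence_length - PySem.Str.len the_str) 1).filter
        (fun i => PySem.Str.isIn the_str
          (PySem.Str.slice sequence (some i) (some (i + PySem.Str.len the_str))))).foldl
       (gstep (PySem.Str.len the_str)) ((0 : Int), (0 : Int), (none : Option Int))).1 := by
  rw [List.foldl_filter]
  rfl

theorem pairloop (k : Int) (S : List Int) :
    List.foldl (fun (s : Int × Int) j =>
        if PySem.List.pyGetD S j 0 + k = PySem.List.pyGetD S (j + 1) 0 then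
          (s.1 + 1, if s.1 + 1 > s.2 then s.1 + 1 else s.2)
        else if s.1 > s.2 then (1, s.1)
        else (1, s.2)) ((1 : Int), (0 : Int))
      (PySem.List.pyRange 0 (PySem.List.len S - 1) 1)
    = List.foldl (astep k) (1, 0) (S.zip S.tail) := by
  rcases S with _ | ⟨x, xs⟩
  · rw [PySem.List.pyRange_one_eq_nil (by simp [PySem.List.len_eq])]
    simp
  · have hzlen : ((x :: xs).zip (x :: xs).tail).length = xs.length := by
      simp [List.length_zip]
    have hbound : PySem.List.len (x :: xs) - 1 = PySem.List.len ((x :: xs).zip (x :: xs).tail) := by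
      simp [PySem.List.len_eq]
    rw [hbound]
    rw [PySem.List.foldl_congr_mem _ _
      (fun (s : Int × Int) j => astep k s (PySem.List.pyGetD ((x :: xs).zip (x :: xs).tail) j (0, 0))) _
      ?_]
    · exact PySem.List.foldl_pyRange_pyGetD _ _ _ _ le_rfl
    · intro acc j hj
      rw [PySem.List.mem_pyRange_one] at hj
      obtain ⟨hj0, hj1⟩ := hj
      rw [PySem.List.len_eq, hzlen] at hj1
      have hjn : j.toNat < xs.length := by omega
      have hjn1 : (j + 1).toNat = j.toNat + 1 := by omega
      have hSlen : j.toNat < (x :: xs).length := by simp; omega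
      have hSlen1 : j.toNat + 1 < (x :: xs).length := by simp; omega
      have hz : PySem.List.pyGetD ((x :: xs).zip (x :: xs).tail) j ((0 : Int), (0 : Int))
          = ((x :: xs)[j.toNat]'hSlen, (x :: xs)[j.toNat + 1]'hSlen1) := by
        rw [PySem.List.pyGetD_eq_getElem _ _ hj0 (by rw [hzlen]; omega)]
        rw [List.getElem_zip]
        simp
      rw [PySem.List.pyGetD_eq_getElem _ _ hj0 (by simpa using hSlen),
          PySem.List.pyGetD_eq_getElem _ _ (by omega) (by rw [hjn1] at *; simp; omega)]
      simp only [astep, hz, hjn1]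

theorem key (k : Int) (xs : List Int) : ∀ (p c h : Int),
    (xs.foldl (gstep k) (max h c, c, some p)).1
    = max (((p :: xs).zip xs).foldl (astep k) (c, h)).2
          (((p :: xs).zip xs).foldl (astep k) (c, h)).1 := by
  induction xs with
  | nil => intro p c h; simp
  | cons x xs ih =>
    intro p c h
    simp only [List.zip_cons_cons, List.foldl_cons]
    by_cases hpk : p + k = x
    · have h1 : gstep k (max h c, c, some p) x = (max (max h (c+1)) (c+1), c+1, some x) := by
        simp [gstep, hpk]; split_ifs <;> first | rfl | omega | (simp [Prod.ext_iff]; omega)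
      have h2 : astep k (c, h) (p, x) = (c+1, max h (c+1)) := by
        simp [astep, hpk]; split_ifs <;> first | rfl | omega | (simp [Prod.ext_iff]; omega)
      rw [h1, h2, ih]
    · have h1 : gstep k (max h c, c, some p) x = (max (max h c) 1, 1, some x) := by
        simp [gstep, hpk]; split_ifs <;> first | rfl | omega | (simp [Prod.ext_iff]; omega)
      have h2 : astep k (c, h) (p, x) = (1, max h c) := by
        simp [astep, hpk]; split_ifs <;> first | rfl | omega | (simp [Prod.ext_iff]; omega)
      rw [h1, h2, ih]

theorem inv (k : Int) (l : List (Int × Int)) : ∀ (q : Int × Int) (c h : Int), 1 ≤ c →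
    (l.foldl (astep k) (astep k (c, h) q)).1 ≤ (l.foldl (astep k) (astep k (c, h) q)).2 ∧
    1 ≤ (l.foldl (astep k) (astep k (c, h) q)).1 := by
  induction l with
  | nil =>
    intro q c h hc
    simp only [List.foldl_nil]
    unfold astep; split_ifs <;> constructor <;> simp <;> omega
  | cons y l ih =>
    intro q c h hc
    simp only [List.foldl_cons]
    have h1 : 1 ≤ (astep k (c, h) q).1 := by unfold astep; split_ifs <;> simp <;> omega
    have := ih y (astep k (c, h) q).1 (astep k (c, h) q).2 h1
    simpa using this

theorem core (k : Int) (S : List Int) :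
    (if PySem.List.len S = 1 then (1 : Int)
     else (List.foldl (astep k) (1, 0) (S.zip S.tail)).2)
    = (S.foldl (gstep k) ((0 : Int), (0 : Int), (none : Option Int))).1 := by
  rcases S with _ | ⟨x, _ | ⟨y, l⟩⟩
  · simp [PySem.List.len_eq]
  · simp [PySem.List.len_eq, gstep]
  · rw [if_neg (by simp [PySem.List.len_eq]; omega)]
    have hB : List.foldl (gstep k) ((0 : Int), (0 : Int), (none : Option Int)) (x :: y :: l)
        = List.foldl (gstep k) (max 0 1, 1, some x) (y :: l) := by
      simp [gstep]
    rw [hB, key]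
    have hr := inv k ((y :: l).zip l) (x, y) 1 0 le_rfl
    simp only [List.tail_cons, List.zip_cons_cons, List.foldl_cons] at *
    omega

theorem pyget_some (ts s : String) (sl : Int)
    (hpre : ¬ (ts = "" ∧ s = "" ∧ 2 ≤ sl))
    (h2 : 2 ≤ ((PySem.List.pyRange 0 (sl - PySem.Str.len ts) 1).filter
          (fun i => PySem.Str.isIn ts (PySem.Str.slice s (some i) (some (i + PySem.Str.len ts))))).length) :
    (PySem.Str.pyGet? s (-(PySem.Str.len ts))).isSome := by
  have hL : 2 ≤ (PySem.List.pyRange 0 (sl - PySem.Str.len ts) 1).length :=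
    le_trans h2 (List.length_filter_le _ _)
  by_cases hts : ts = ""
  · subst hts
    have hk0 : PySem.Str.len "" = 0 := by decide
    have hsl : 2 ≤ sl := by
      rw [PySem.List.length_pyRange_one, hk0] at hL
      omega
    have hs : s ≠ "" := fun h => hpre ⟨rfl, h, hsl⟩
    have hsl' : s.toList ≠ [] := by simp [String.toList_eq_nil_iff, hs]
    rw [hk0, neg_zero, show (0 : Int) = ((0 : Nat) : Int) from rfl, PySem.Str.pyGet?_natCast]
    have : 0 < s.toList.length := List.length_pos_of_ne_nil hsl'
    simp [List.getElem?_eq_getElem this]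
  · -- some position matches, so ts fits inside a slice of s: len ts ≤ len s
    have hF : ∃ i, i ∈ (PySem.List.pyRange 0 (sl - PySem.Str.len ts) 1).filter
          (fun i => PySem.Str.isIn ts (PySem.Str.slice s (some i) (some (i + PySem.Str.len ts)))) := by
      apply List.exists_mem_of_ne_nil
      intro h
      rw [h] at h2
      simp at h2
    obtain ⟨i, hiF⟩ := hF
    have hm := List.of_mem_filter hiF
    have hinf : ts.toList <:+: (PySem.Str.slice s (some i) (some (i + PySem.Str.len ts))).toList :=
      (PySem.Str.isIn_iff_infix _ _).mp hm
    have hbridge : (PySem.Str.slice s (some i) (some (i + PySem.Str.len ts))).toList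
        = PySem.List.slice s.toList (some i) (some (i + PySem.Str.len ts)) := by
      simp [PySem.Str.slice]
    rw [hbridge] at hinf
    have hlen1 := hinf.length_le
    have hlen2 : (PySem.List.slice s.toList (some i) (some (i + PySem.Str.len ts))).length
        ≤ s.toList.length := by
      rw [PySem.List.length_slice]
      have := PySem.List.clampIdx_le s.toList.length (i + PySem.Str.len ts)
      omega
    have hn1 : 0 < ts.toList.length :=
      List.length_pos_of_ne_nil (by simp [String.toList_eq_nil_iff, hts])
    have hn2 : ts.toList.length ≤ s.toList.length := le_trans hlen1 hlen2
    rw [PySem.Str.len_eq, PySem.Str.pyGet?_eq,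
        show PySem.Chars.pyGet? = @PySem.List.pyGet? Char from rfl,
        PySem.List.pyGet?_neg_natCast _ _ hn1 hn2]
    have hlt : s.toList.length - ts.toList.length < s.toList.length := by omega
    rw [List.getElem?_eq_getElem hlt]
    simp

-- ===== VERDICT (by name: the statement is the Claim_ definition above) =====
theorem check_repeats_spec : Claim_equal_check_repeats := by
  intro the_str sequence_length sequence _ hpre
  unfold Spec_check_repeats
  rw [altB_eq]
  simp only [check_repeats]
  rw [PySem.List.foldl_append_if_eq_filter, List.nil_append,
      pairloop (PySem.Str.len the_str)]
  rcases hg : PySem.Str.pyGet? sequence (-PySem.Str.len the_str) with _ | c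
  · -- pyGet? returned none: the filtered list has fewer than 2 positions
    have hlen : ¬ 2 ≤ ((PySem.List.pyRange 0 (sequence_length - PySem.Str.len the_str) 1).filter
        (fun i => PySem.Str.isIn the_str
          (PySem.Str.slice sequence (some i) (some (i + PySem.Str.len the_str))))).length := by
      intro h2
      have := pyget_some the_str sequence sequence_length hpre h2
      rw [hg] at this
      simp at this
    rcases hS : (PySem.List.pyRange 0 (sequence_length - PySem.Str.len the_str) 1).filter
        (fun i => PySem.Str.isIn the_str
          (PySem.Str.slice sequence (some i) (some (i + PySem.Str.len the_str)))) with _ | ⟨x, _ | ⟨y, l⟩⟩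
    · simp [PySem.List.len_eq]
    · simp [PySem.List.len_eq, gstep]
    · exact absurd (by rw [hS]; simp) hlen
  · -- pyGet? returned a character: A's final comparison is dead and A returns highest_count
    rw [← core (PySem.Str.len the_str)]
    simp only [ite_self]

@[simp] theorem check_repeats_raises : Claim_raises_check_repeats := by
  unfold Claim_raises_check_repeats
  exact ⟨fun _ _ _ _ h hp => hp h, by decide⟩
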